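-- pv_equiv track=rewrite | github.com/agentOfChaos/divergence-viewer | engine/numeric.py | custom_round
-- ===== SOURCE A (Python) =====
-- def custom_round(number, precision):
--     (integer, decimal) = number.split(".")
--
--     integers = list(map(lambda d: int(d), integer))
--     decimals = list(map(lambda d: int(d), decimal))
--
--     rounded_decimals = []
--     rounded_integers = []
--
--     carry = 0
--     for index,digit in reversed(list(enumerate(decimals))):
--         digit = digit + carry
--         carry = 0
--         if digit >= 10:
--             digit = 0
--             carry = 1
--
--         if index >= precision:
--             if digit >= 5: carry = 1
--         else:
--             rounded_decimals.insert(0, digit)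
--
--     for index,digit in reversed(list(enumerate(integers))):
--         digit = digit + carry
--         carry = 0
--         if digit >= 10:
--             digit = 0
--             carry = 1
--         rounded_integers.insert(0, digit);
--     if carry > 0:
--         rounded_integers.insert(0, 1);
--
--     return "".join(list(map(lambda n: str(n), rounded_integers))) + "." + "".join(list(map(lambda n: str(n), rounded_decimals)))
-- ===== SOURCE B (Python) =====
-- def custom_round(number, precision):
--     integer, decimal = number.split(".")
--     int_digits = [int(d) for d in integer]
--     dec_digits = [int(d) for d in decimal]
--     keep = max(0, min(precision, len(dec_digits)))
--     carry = 0
--     for d in reversed(dec_digits[keep:]):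
--         carry = 1 if d + carry >= 5 else 0
--     kept = int_digits + dec_digits[:keep]
--     value = 0
--     for d in kept:
--         value = 10 * value + d
--     value += carry
--     out = []
--     for _ in range(len(kept)):
--         value, r = divmod(value, 10)
--         out.append(str(r))
--     if value:
--         out.append("1")
--     s = "".join(reversed(out))
--     cut = len(s) - keep
--     return s[:cut] + "." + s[cut:]
-- ===== Notes on version B (the rewrite author's own statement) =====
-- stated objective: alternative
-- what changed: A ripples the rounding carry digit by digit through two reversed index-tracking loops that build the output digit lists with insert(0, ...); B computes the carry with one fold over the dropped digits, then treats all kept digits as a single integer, adds the carry once, and re-renders the digits by repeated divmod, so the overflow '1' and the split into integer/decimal part fall out of plain slicing.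
import Mathlib
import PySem

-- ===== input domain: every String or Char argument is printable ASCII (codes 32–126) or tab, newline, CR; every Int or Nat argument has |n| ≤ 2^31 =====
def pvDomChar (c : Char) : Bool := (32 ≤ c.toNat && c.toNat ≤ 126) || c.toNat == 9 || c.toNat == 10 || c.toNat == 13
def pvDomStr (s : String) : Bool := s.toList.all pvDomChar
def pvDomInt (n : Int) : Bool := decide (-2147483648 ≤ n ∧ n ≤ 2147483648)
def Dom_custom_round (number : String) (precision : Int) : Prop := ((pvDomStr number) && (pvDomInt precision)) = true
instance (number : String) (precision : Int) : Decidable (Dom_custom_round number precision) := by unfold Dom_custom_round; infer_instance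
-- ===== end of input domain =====

-- B rounds by treating the kept digits as one integer (add the rounding carry once, re-render it
-- by repeated divmod) instead of A's two per-digit ripple loops; same return value on Pre_.

-- ===== PORT A =====
-- int(d) for a single digit character (non-digit characters raise ValueError in Python; excluded by Pre_)
def pvDigit (c : Char) : Int := (c.toNat : Int) - 48

-- 'for index,digit in reversed(list(enumerate(decimals)))': the recursion processes the highest
-- index first, exactly like the reversed loop; returns (rounded_decimals, carry)
def aDecLoop (prec : Int) (idx : Int) : List Int → List Int × Int
  | [] => ([], 0)
  | d :: rest =>
    let p := aDecLoop prec (idx + 1) rest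
    let digit := d + p.2
    let digit2 := if digit ≥ 10 then 0 else digit
    let carry2 := if digit ≥ 10 then (1 : Int) else 0
    if idx ≥ prec then (p.1, if digit2 ≥ 5 then 1 else carry2)
    else (digit2 :: p.1, carry2)

-- the second reversed loop, over the integer digits; cin is the carry left by the decimal loop
def aIntLoop (cin : Int) : List Int → List Int × Int
  | [] => ([], cin)
  | d :: rest =>
    let p := aIntLoop cin rest
    let digit := d + p.2
    if digit ≥ 10 then (0 :: p.1, 1) else (digit :: p.1, 0)

def custom_round (number : String) (precision : Int) : String :=
  match PySem.Chars.split? number.toList ['.'] with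
  | some [integer, decimal] =>
    let integers := integer.map pvDigit
    let decimals := decimal.map pvDigit
    let pd := aDecLoop precision 0 decimals
    let pint := aIntLoop pd.2 integers
    let ri := if pint.2 > 0 then 1 :: pint.1 else pint.1
    String.ofList (PySem.Chars.join [] (ri.map PySem.Int.toChars) ++ ['.'] ++
                   PySem.Chars.join [] (pd.1.map PySem.Int.toChars))
  | _ => ""   -- 'integer, decimal = …' raises unless split yields exactly two parts (outside Pre_)

-- ===== PORT B =====
-- 'for _ in range(len(kept)): value, r = divmod(value, 10); out.append(str(r))'
def renderLoop : Nat → Int → List (List Char) → List (List Char) × Int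
  | 0, v, out => (out, v)
  | n + 1, v, out =>
    renderLoop n (PySem.Int.floordiv v 10) (out ++ [PySem.Int.toChars (PySem.Int.mod v 10)])

-- int(d) for a single digit character, B's copy (non-digits raise ValueError; excluded by Pre_)
def pvDigitB (c : Char) : Int := (c.toNat : Int) - 48

def custom_round_alt (number : String) (precision : Int) : String :=
  let parts := (PySem.Chars.split? number.toList ['.']).getD []
  if parts.length = 2 then   -- 'integer, decimal = …' raises otherwise (outside Pre_)
    let integer := parts.headD []
    let decimal := parts.tail.headD []
    let intDigits := integer.map pvDigitB
    let decDigits := decimal.map pvDigitB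
    let keep := max 0 (min precision (PySem.List.len decDigits))
    let carry := (PySem.List.slice decDigits (some keep) none).reverse.foldl
                   (fun c d => if d + c ≥ 5 then (1 : Int) else 0) 0
    let kept := intDigits ++ PySem.List.slice decDigits none (some keep)
    let value := kept.foldl (fun v d => 10 * v + d) 0 + carry
    let p := renderLoop kept.length value []
    let out := if p.2 ≠ 0 then p.1 ++ [['1']] else p.1
    let s := PySem.Chars.join [] out.reverse
    let cut := PySem.List.len s - keep
    String.ofList (PySem.List.slice s none (some cut) ++ ['.'] ++
                   PySem.List.slice s (some cut) none)
  else ""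

-- ===== PRECONDITION & SPEC =====
-- exactly the inputs on which A returns: one '.' in the string and every other character an ASCII
-- digit (otherwise the tuple unpacking after split, or int(d), raises ValueError)
def Pre_custom_round (number : String) (precision : Int) : Prop :=
  number.toList.count '.' = 1 ∧
    number.toList.all (fun c => c == '.' || c.isDigit) = true
instance (number : String) (precision : Int) : Decidable (Pre_custom_round number precision) := by
  unfold Pre_custom_round; infer_instance

def pvWitness_custom_round : String × Int := ("12.345", 2)

def Spec_custom_round (number : String) (precision : Int) (out : String) : Prop := out = custom_round_alt number precision
instance (number : String) (precision : Int) (out : String) : Decidable (Spec_custom_round number precision out) := by unfold Spec_custom_round; infer_instance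

-- ===== CLAIM (what is proved, stated in full; the proofs are below) =====
def Claim_equal_custom_round : Prop := ∀ (number : String) (precision : Int), Dom_custom_round number precision → Pre_custom_round number precision → Spec_custom_round number precision (custom_round number precision)

-- ===== LEMMAS AND PROOFS =====

-- specification-side helpers: the carry decision over the dropped digits, the ripple add over the
-- kept digits, and the numeric value of a digit list
def rcarry (l : List Int) : Int := l.foldr (fun d c => if d + c ≥ 5 then 1 else 0) 0

def ripple : List Int → Int → List Int × Int
  | [], c => ([], c)
  | d :: t, c =>
    let p := ripple t c
    ((if d + p.2 ≥ 10 then 0 else d + p.2) :: p.1, if d + p.2 ≥ 10 then (1 : Int) else 0)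

def dval (l : List Int) : Int := l.foldl (fun v d => 10 * v + d) 0

lemma rcarry_cons (d : Int) (t : List Int) :
    rcarry (d :: t) = if d + rcarry t ≥ 5 then 1 else 0 := rfl

lemma aDecLoop_eq (prec : Int) : ∀ (ds : List Int) (idx : Int),
    aDecLoop prec idx ds =
      ripple (ds.take (prec - idx).toNat) (rcarry (ds.drop (prec - idx).toNat)) := by
  intro ds
  induction ds with
  | nil => intro idx; simp [aDecLoop, ripple, rcarry]
  | cons d rest ih =>
    intro idx
    by_cases h : idx ≥ prec
    · have ht : (prec - idx).toNat = 0 := by omega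
      have ht' : (prec - (idx + 1)).toNat = 0 := by omega
      simp only [aDecLoop, ih (idx + 1), ht, ht', List.take_zero, List.drop_zero]
      simp only [ripple, rcarry_cons, if_pos h]
      split_ifs <;> first | rfl | omega
    · have ht : (prec - idx).toNat = (prec - (idx + 1)).toNat + 1 := by omega
      simp only [aDecLoop, ih (idx + 1), ht, List.take_succ_cons, List.drop_succ_cons]
      simp only [ripple, if_neg h]

lemma aIntLoop_eq (cin : Int) : ∀ ds : List Int, aIntLoop cin ds = ripple ds cin := by
  intro ds
  induction ds with
  | nil => rfl
  | cons d rest ih =>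
    simp only [aIntLoop, ih, ripple]
    split_ifs <;> rfl

lemma ripple_append (xs ys : List Int) (c : Int) :
    ripple (xs ++ ys) c =
      ((ripple xs (ripple ys c).2).1 ++ (ripple ys c).1, (ripple xs (ripple ys c).2).2) := by
  induction xs with
  | nil => simp [ripple]
  | cons d t ih => simp only [List.cons_append, ripple, ih]

lemma ripple_facts : ∀ (ds : List Int) (c : Int),
    (∀ d ∈ ds, 0 ≤ d ∧ d < 10) → 0 ≤ c → c ≤ 1 →
    (∀ e ∈ (ripple ds c).1, 0 ≤ e ∧ e < 10) ∧ 0 ≤ (ripple ds c).2 ∧ (ripple ds c).2 ≤ 1 ∧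
      (ripple ds c).1.length = ds.length := by
  intro ds
  induction ds with
  | nil =>
    intro c _ h0 h1
    exact ⟨by simp [ripple], by simpa [ripple] using h0, by simpa [ripple] using h1,
      by simp [ripple]⟩
  | cons d t ih =>
    intro c hd h0 h1
    obtain ⟨hmem, hc0, hc1, hlen⟩ := ih c (fun x hx => hd x (List.mem_cons_of_mem _ hx)) h0 h1
    have hdd := hd d List.mem_cons_self
    simp only [ripple]
    refine ⟨?_, ?_, ?_, by simp [hlen]⟩
    · intro e he
      rcases List.mem_cons.mp he with rfl | he'
      · split_ifs <;> omega
      · exact hmem e he'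
    · split_ifs <;> omega
    · split_ifs <;> omega

lemma rcarry_bounds (l : List Int) : 0 ≤ rcarry l ∧ rcarry l ≤ 1 := by
  cases l with
  | nil => simp [rcarry]
  | cons d t => rw [rcarry_cons]; split_ifs <;> simp

lemma dval_shift : ∀ (t : List Int) (a : Int),
    t.foldl (fun v d => 10 * v + d) a = a * 10 ^ t.length + dval t := by
  intro t
  induction t with
  | nil => intro a; simp [dval]
  | cons e r ih =>
    intro a
    simp only [dval, List.foldl_cons, List.length_cons, mul_zero, zero_add]
    rw [ih (10 * a + e), ih e]
    ring

lemma dval_cons (d : Int) (t : List Int) : dval (d :: t) = d * 10 ^ t.length + dval t := by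
  have h := dval_shift t d
  simp only [dval, List.foldl_cons, mul_zero, zero_add]
  exact h

lemma dval_append_singleton (l : List Int) (d : Int) : dval (l ++ [d]) = 10 * dval l + d := by
  simp [dval, List.foldl_append]

lemma dval_ripple : ∀ (ds : List Int) (c : Int), (∀ d ∈ ds, 0 ≤ d ∧ d < 10) →
    0 ≤ c → c ≤ 1 →
    dval ds + c = (ripple ds c).2 * 10 ^ ds.length + dval (ripple ds c).1 := by
  intro ds
  induction ds with
  | nil => intro c _ _ _; simp [ripple, dval]
  | cons d t ih =>
    intro c hd h0 h1
    have hmem := fun x hx => hd x (List.mem_cons_of_mem _ hx)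
    have ihv := ih c hmem h0 h1
    obtain ⟨hout, hc0, hc1, hlen⟩ := ripple_facts t c hmem h0 h1
    have hdd := hd d List.mem_cons_self
    simp only [ripple, List.length_cons]
    rw [dval_cons, dval_cons, hlen]
    split_ifs with h
    · have h10 : d + (ripple t c).2 = 10 := by omega
      linear_combination (10 : Int) ^ t.length * h10 + ihv
    · linear_combination ihv

lemma renderLoop_eq (l : List Int) : ∀ (cout : Int) (out : List (List Char)),
    (∀ d ∈ l, 0 ≤ d ∧ d < 10) →
    renderLoop l.length (cout * 10 ^ l.length + dval l) out =
      (out ++ l.reverse.map PySem.Int.toChars, cout) := by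
  induction l using List.reverseRecOn with
  | nil => intro cout out _; simp [renderLoop, dval]
  | append_singleton l' d ih =>
    intro cout out h
    have hd := h d (by simp)
    have hl' : ∀ x ∈ l', 0 ≤ x ∧ x < 10 := fun x hx => h x (by simp [hx])
    have hlen : (l' ++ [d]).length = l'.length + 1 := by simp
    rw [hlen, dval_append_singleton]
    have hv : cout * 10 ^ (l'.length + 1) + (10 * dval l' + d)
        = 10 * (cout * 10 ^ l'.length + dval l') + d := by ring
    simp only [renderLoop]
    have hdiv : PySem.Int.floordiv (cout * 10 ^ (l'.length + 1) + (10 * dval l' + d)) 10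
        = cout * 10 ^ l'.length + dval l' := by
      rw [PySem.Int.floordiv_eq_ediv_of_pos (by norm_num), hv]; omega
    have hmod : PySem.Int.mod (cout * 10 ^ (l'.length + 1) + (10 * dval l' + d)) 10 = d := by
      rw [PySem.Int.mod_eq_emod_of_pos (by norm_num), hv]; omega
    rw [hdiv, hmod, ih cout (out ++ [PySem.Int.toChars d]) hl']
    simp

lemma toChars_digit_len (d : Int) (h0 : 0 ≤ d) (h1 : d < 10) :
    (PySem.Int.toChars d).length = 1 := by
  interval_cases d <;> rfl

lemma sum_len_toChars (l : List Int) (h : ∀ d ∈ l, 0 ≤ d ∧ d < 10) :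
    (l.map (Nat.cast ∘ List.length ∘ PySem.Int.toChars)).sum = (l.length : Int) := by
  induction l with
  | nil => simp
  | cons d t ih =>
    have hd := h d List.mem_cons_self
    simp only [List.map_cons, List.sum_cons, List.length_cons,
      ih (fun x hx => h x (List.mem_cons_of_mem _ hx)), Function.comp_apply,
      toChars_digit_len d hd.1 hd.2]
    push_cast
    ring

lemma flatten_map_toChars_length (l : List Int) (h : ∀ d ∈ l, 0 ≤ d ∧ d < 10) :
    (l.map PySem.Int.toChars).flatten.length = l.length := by
  induction l with
  | nil => simp
  | cons d t ih =>
    have hd := h d List.mem_cons_self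
    simp [toChars_digit_len d hd.1 hd.2, ih (fun x hx => h x (List.mem_cons_of_mem _ hx))]
    omega

lemma join_nil_eq_flatten (parts : List (List Char)) :
    PySem.Chars.join [] parts = parts.flatten := by
  show (parts.intersperse []).flatten = parts.flatten
  induction parts with
  | nil => rfl
  | cons p t ih =>
    cases t with
    | nil => rfl
    | cons q r =>
      rw [List.intersperse_cons₂]
      simp only [List.flatten_cons] at *
      simp [ih]

lemma pvDigit_bounds (c : Char) (h : c.isDigit = true) : 0 ≤ pvDigit c ∧ pvDigit c < 10 := by
  simp [Char.isDigit] at h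
  obtain ⟨h1, h2⟩ := h
  have a1 : 48 ≤ c.toNat := h1
  have a2 : c.toNat ≤ 57 := h2
  unfold pvDigit
  omega

-- splitOn.go on a chunk free of the separator just copies it into cur
lemma go_no_sep : ∀ (L : List Char) (fuel : Nat) (cur : List Char) (acc : List (List Char)),
    '.' ∉ L → L.length ≤ fuel →
    PySem.Chars.splitOn.go ['.'] fuel L cur acc = ((cur.reverse ++ L) :: acc).reverse := by
  intro L
  induction L with
  | nil =>
    intro fuel cur acc _ _
    cases fuel <;> simp [PySem.Chars.splitOn.go.eq_def]
  | cons c rest ih =>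
    intro fuel cur acc hns hf
    obtain ⟨f, rfl⟩ : ∃ f, fuel = f + 1 :=
      ⟨fuel - 1, by simp only [List.length_cons] at hf; omega⟩
    have hc : c ≠ '.' := fun hc => hns (hc ▸ List.mem_cons_self)
    rw [PySem.Chars.splitOn.go.eq_def]
    simp only [List.isPrefixOf, Bool.and_eq_true, beq_iff_eq, and_true, if_neg (Ne.symm hc)]
    rw [ih f (c :: cur) acc (fun hm => hns (List.mem_cons_of_mem _ hm))
      (by simp only [List.length_cons] at hf; omega)]
    simp

lemma splitOn_dot (I D : List Char) (hI : '.' ∉ I) (hD : '.' ∉ D) :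
    PySem.Chars.split? (I ++ '.' :: D) ['.'] = some [I, D] := by
  have main : ∀ (I' : List Char) (fuel : Nat) (cur : List Char) (acc : List (List Char)),
      '.' ∉ I' → I'.length + D.length + 1 ≤ fuel →
      PySem.Chars.splitOn.go ['.'] fuel (I' ++ '.' :: D) cur acc
        = (((cur.reverse ++ I') :: acc).reverse) ++ [D] := by
    intro I'
    induction I' with
    | nil =>
      intro fuel cur acc _ hf
      obtain ⟨f, rfl⟩ : ∃ f, fuel = f + 1 := ⟨fuel - 1, by omega⟩
      rw [PySem.Chars.splitOn.go.eq_def]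
      have hgo := go_no_sep D f [] (cur.reverse :: acc) hD (by omega)
      simp [List.isPrefixOf, hgo]
    | cons c rest ih =>
      intro fuel cur acc hns hf
      obtain ⟨f, rfl⟩ : ∃ f, fuel = f + 1 := ⟨fuel - 1, by omega⟩
      have hc : c ≠ '.' := fun hc => hns (hc ▸ List.mem_cons_self)
      rw [PySem.Chars.splitOn.go.eq_def]
      simp only [List.cons_append, List.isPrefixOf, Bool.and_eq_true, beq_iff_eq,
        and_true, if_neg (Ne.symm hc)]
      rw [ih f (c :: cur) acc (fun hm => hns (List.mem_cons_of_mem _ hm))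
        (by simp only [List.length_cons] at hf; omega)]
      simp
  show (if ([('.' : Char)] : List Char).isEmpty = true then none
        else some (PySem.Chars.splitOn (I ++ '.' :: D) ['.'])) = some [I, D]
  rw [if_neg (by simp)]
  unfold PySem.Chars.splitOn
  rw [main I ((I ++ '.' :: D).length + 1) [] [] hI (by simp)]
  simp

lemma count_one_decomp : ∀ l : List Char, l.count '.' = 1 →
    ∃ I D, l = I ++ '.' :: D ∧ '.' ∉ I ∧ '.' ∉ D := by
  intro l
  induction l with
  | nil => intro h; simp at h
  | cons c t ih =>
    intro h
    by_cases hc : c = '.'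
    · subst hc
      have : t.count '.' = 0 := by simpa using h
      exact ⟨[], t, by simp, by simp, by simpa [List.count_eq_zero] using this⟩
    · have : t.count '.' = 1 := by simpa [List.count_cons, hc] using h
      obtain ⟨I, D, rfl, hI, hD⟩ := ih this
      refine ⟨c :: I, D, by simp, ?_, hD⟩
      intro hm
      rcases List.mem_cons.mp hm with h' | h'
      · exact hc h'.symm
      · exact hI h'

lemma take_drop_clamp (dD : List Int) (p : Int) :
    dD.take p.toNat = dD.take (max 0 (min p (dD.length : Int))).toNat ∧
    dD.drop p.toNat = dD.drop (max 0 (min p (dD.length : Int))).toNat := by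
  by_cases h : p ≤ (dD.length : Int)
  · have : p.toNat = (max 0 (min p (dD.length : Int))).toNat := by omega
    rw [this]; exact ⟨rfl, rfl⟩
  · have h1 : dD.length ≤ p.toNat := by omega
    have h2 : (max 0 (min p (dD.length : Int))).toNat = dD.length := by omega
    rw [h2]
    exact ⟨by rw [List.take_of_length_le h1, List.take_length],
           by rw [List.drop_of_length_le h1, List.drop_length]⟩

-- the common normal form both ports reduce to
def outChars (precision : Int) (dI dD : List Int) : List Char :=
  let m := (max 0 (min precision (dD.length : Int))).toNat
  let c := rcarry (dD.drop m)
  let q := ripple (dD.take m) c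
  let p := ripple dI q.2
  let ri := if p.2 > 0 then 1 :: p.1 else p.1
  (ri.map PySem.Int.toChars).flatten ++ ['.'] ++ (q.1.map PySem.Int.toChars).flatten

lemma custom_round_chars (number : String) (precision : Int) (I D : List Char)
    (h : PySem.Chars.split? number.toList ['.'] = some [I, D]) :
    custom_round number precision =
      String.ofList (outChars precision (I.map pvDigit) (D.map pvDigit)) := by
  unfold custom_round
  rw [h]
  unfold outChars
  simp only [join_nil_eq_flatten, aDecLoop_eq, aIntLoop_eq, sub_zero]
  rw [(take_drop_clamp (D.map pvDigit) precision).1, (take_drop_clamp (D.map pvDigit) precision).2]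

lemma custom_round_alt_chars (number : String) (precision : Int) (I D : List Char)
    (h : PySem.Chars.split? number.toList ['.'] = some [I, D])
    (hIdig : ∀ c ∈ I, c.isDigit = true) (hDdig : ∀ c ∈ D, c.isDigit = true) :
    custom_round_alt number precision =
      String.ofList (outChars precision (I.map pvDigit) (D.map pvDigit)) := by
  unfold custom_round_alt
  rw [h]
  simp only [Option.getD_some, List.headD_cons, List.tail_cons]
  rw [if_pos (by simp)]
  simp only [PySem.List.len_eq, join_nil_eq_flatten, outChars,
    show pvDigitB = pvDigit from rfl]
  have hK0 : (0 : Int) ≤ max 0 (min precision ((D.map pvDigit).length : Int)) := le_max_left _ _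
  rw [PySem.List.slice_from _ hK0, PySem.List.slice_to _ hK0, List.foldl_reverse]
  set dI := I.map pvDigit with hdIdef
  set dD := D.map pvDigit with hdDdef
  set m := (max 0 (min precision ((dD.length : Int)))).toNat with hmdef
  have hmle : m ≤ dD.length := by omega
  rw [show List.foldr (fun x y => if x + y ≥ 5 then 1 else 0) 0 (dD.drop m) = rcarry (dD.drop m)
    from rfl]
  rw [show List.foldl (fun v d => 10 * v + d) 0 (dI ++ dD.take m) = dval (dI ++ dD.take m)
    from rfl]
  -- digit bounds
  have hdIb : ∀ d ∈ dI, 0 ≤ d ∧ d < 10 := by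
    intro d hd
    obtain ⟨ch, hc, rfl⟩ := List.mem_map.mp hd
    exact pvDigit_bounds ch (hIdig ch hc)
  have hdDb : ∀ d ∈ dD, 0 ≤ d ∧ d < 10 := by
    intro d hd
    obtain ⟨ch, hc, rfl⟩ := List.mem_map.mp hd
    exact pvDigit_bounds ch (hDdig ch hc)
  have hA2b : ∀ d ∈ dI ++ dD.take m, 0 ≤ d ∧ d < 10 := by
    intro d hd
    rcases List.mem_append.mp hd with h' | h'
    · exact hdIb d h'
    · exact hdDb d (List.mem_of_mem_take h')
  have hc01 := rcarry_bounds (dD.drop m)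
  set c := rcarry (dD.drop m) with hcdef
  -- value of the kept digits, rippled
  have hval := dval_ripple (dI ++ dD.take m) c hA2b hc01.1 hc01.2
  obtain ⟨hPdig, -, -, hPlen⟩ := ripple_facts (dI ++ dD.take m) c hA2b hc01.1 hc01.2
  rw [hval, ← hPlen]
  rw [renderLoop_eq (ripple (dI ++ dD.take m) c).1 (ripple (dI ++ dD.take m) c).2 [] hPdig]
  rw [ripple_append]
  set q := ripple (List.take m dD) c with hqdef
  set p := ripple dI q.2 with hpdef
  obtain ⟨hqdig, hq0, hq1, hqlen⟩ := ripple_facts (List.take m dD) c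
    (fun d hd => hdDb d (List.mem_of_mem_take hd)) hc01.1 hc01.2
  obtain ⟨hpdig, hp0, hp1, hplen⟩ := ripple_facts dI q.2 hdIb hq0 hq1
  have htl : (List.take m dD).length = m := by rw [List.length_take]; omega
  have hKm : max 0 (min precision (dD.length : Int)) = (m : Int) := by omega
  rw [hKm]
  dsimp only [List.nil_append]
  have hp0' : 0 ≤ p.2 := hp0
  have hp1' : p.2 ≤ 1 := hp1
  have hpdig' : ∀ e ∈ p.1, 0 ≤ e ∧ e < 10 := hpdig
  have hqdig' : ∀ e ∈ q.1, 0 ≤ e ∧ e < 10 := hqdig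
  have hplen' : p.1.length = dI.length := hplen
  have hqlen' : q.1.length = m := by
    rw [(show q.1.length = (List.take m dD).length from hqlen), htl]
  have h1c : PySem.Int.toChars 1 = ['1'] := rfl
  have hlu : ((List.map PySem.Int.toChars p.1).flatten).length = dI.length := by
    rw [flatten_map_toChars_length p.1 hpdig', hplen']
  rcases (show p.2 = 0 ∨ p.2 = 1 by omega) with h2 | h2
  · rw [h2]
    norm_num
    rw [sum_len_toChars p.1 hpdig', sum_len_toChars q.1 hqdig', hplen', hqlen']
    rw [show (dI.length : Int) + (m : Int) - (m : Int) = ((dI.length : Nat) : Int) by ring]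
    rw [PySem.List.slice_to _ (by positivity), PySem.List.slice_from _ (by positivity)]
    rw [Int.toNat_natCast]
    rw [List.take_left' hlu, List.drop_left' hlu]
  · rw [h2]
    norm_num
    rw [sum_len_toChars p.1 hpdig', sum_len_toChars q.1 hqdig', hplen', hqlen']
    rw [show (dI.length : Int) + (m : Int) + 1 - (m : Int) = (((dI.length + 1 : Nat)) : Int) by
      push_cast; ring]
    rw [PySem.List.slice_to _ (by positivity), PySem.List.slice_from _ (by positivity)]
    rw [Int.toNat_natCast]
    rw [List.take_succ_cons, List.drop_succ_cons]
    rw [List.take_left' hlu, List.drop_left' hlu]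
    apply String.toList_inj.mp
    simp [h1c]

-- ===== VERDICT (by name: the statement is the Claim_ definition above) =====
theorem custom_round_spec : Claim_equal_custom_round := by
  intro number precision _ hpre
  unfold Spec_custom_round
  obtain ⟨hcount, hdig'⟩ := hpre
  have hdig : ∀ c ∈ number.toList, c = '.' ∨ c.isDigit = true := by
    intro c hc
    simpa using List.all_eq_true.mp hdig' c hc
  obtain ⟨I, D, hsplit, hI, hD⟩ := count_one_decomp _ hcount
  have hsp : PySem.Chars.split? number.toList ['.'] = some [I, D] := by
    rw [hsplit]; exact splitOn_dot I D hI hD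
  have hIdig : ∀ c ∈ I, c.isDigit = true := by
    intro c hc
    rcases hdig c (by rw [hsplit]; exact List.mem_append_left _ hc) with h | h
    · exact absurd (h ▸ hc) hI
    · exact h
  have hDdig : ∀ c ∈ D, c.isDigit = true := by
    intro c hc
    rcases hdig c (by rw [hsplit]; exact List.mem_append_right _ (List.mem_cons_of_mem _ hc))
      with h | h
    · exact absurd (h ▸ hc) hD
    · exact h
  rw [custom_round_chars number precision I D hsp,
    custom_round_alt_chars number precision I D hsp hIdig hDdig]
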